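-- pv_equiv track=rewrite | github.com/SoBigHead/awesome-seedance | scripts/gen_placeholder_thumbs.py | wrap_lines
-- ===== SOURCE A (Python) =====
-- def wrap_lines(s: str, max_chars: int, max_lines: int):
--     s = " ".join((s or "").split())
--     if not s:
--         return [""]
--     words = s.split(" ")
--     lines = []
--     cur = ""
--     for w in words:
--         nxt = (cur + " " + w).strip()
--         if len(nxt) <= max_chars:
--             cur = nxt
--         else:
--             if cur:
--                 lines.append(cur)
--             cur = w
--             if len(lines) >= max_lines:
--                 break
--     if len(lines) < max_lines and cur:
--         lines.append(cur)
--     if len(lines) > max_lines: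
--         lines = lines[:max_lines]
--     # ellipsize last line if too long
--     if lines and len(lines[-1]) > max_chars:
--         lines[-1] = lines[-1][: max_chars - 1] + "…"
--     return lines
-- ===== SOURCE B (Python) =====
-- def wrap_lines(s: str, max_chars: int, max_lines: int):
--     # Normalize whitespace (same as A); empty text keeps A's [""] answer.
--     s = " ".join((s or "").split())
--     if not s:
--         return [""]
--     words = s.split(" ")
--     n = len(words)
--     # Prefix sums of word lengths: pref[j] = total chars of words[:j].
--     pref = [0]
--     for w in words:
--         pref.append(pref[-1] + len(w))
--     # For each line starting at word i, find its end j by BINARY SEARCH over the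
--     # prefix sums: j is the largest index in (i, n] whose joined width
--     # pref[j]-pref[i] + (j-i-1) fits in max_chars (at least one word per line).
--     lines = []
--     i = 0
--     while i < n:
--         lo, hi = i + 1, n
--         while lo < hi:
--             mid = (lo + hi + 1) // 2
--             if pref[mid] - pref[i] + (mid - i - 1) <= max_chars:
--                 lo = mid
--             else:
--                 hi = mid - 1
--         j = lo
--         lines.append(" ".join(words[i:j]))
--         i = j
--     # Keep at most max_lines lines (none when the limit is not positive).
--     lines = lines[:max_lines] if max_lines > 0 else []
--     # Ellipsize the last line if it is still too long.
--     if lines and len(lines[-1]) > max_chars: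
--         lines[-1] = lines[-1][:max_chars - 1] + "…"
--     return lines
-- ===== Notes on version B (the rewrite author's own statement) =====
-- stated objective: alternative
-- what changed: B replaces A's character-accumulating greedy loop (with interleaved line counting, early break and conditional final append) by index arithmetic: it precomputes prefix sums of the word lengths, finds each line break by binary search over them, builds each line by joining a slice of the word list, and truncates to max_lines as a separate slice.
import Mathlib
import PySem

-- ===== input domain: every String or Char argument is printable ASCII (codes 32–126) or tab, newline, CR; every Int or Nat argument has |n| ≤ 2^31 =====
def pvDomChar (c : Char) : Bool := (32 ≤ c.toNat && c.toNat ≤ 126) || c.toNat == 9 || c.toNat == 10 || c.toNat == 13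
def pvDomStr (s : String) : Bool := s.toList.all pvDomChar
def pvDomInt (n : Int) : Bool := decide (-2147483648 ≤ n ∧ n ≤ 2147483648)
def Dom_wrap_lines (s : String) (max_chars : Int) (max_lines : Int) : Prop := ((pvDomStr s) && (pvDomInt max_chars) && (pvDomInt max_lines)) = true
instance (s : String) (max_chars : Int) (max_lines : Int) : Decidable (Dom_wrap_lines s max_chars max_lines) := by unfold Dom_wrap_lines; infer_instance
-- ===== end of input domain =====

-- B replaces A's character-accumulating greedy loop by prefix sums of word lengths, a binary
-- search per line break, and slicing; same return value (objective: alternative algorithm).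

-- Both Pythons share the normalization line  s = " ".join((s or "").split())  — ported once.
def pvNorm (s : String) : List Char :=
  PySem.Chars.join [' '] (PySem.Chars.split₀ ((if s = "" then "" else s).toList))

-- Both Pythons share the final ellipsizing lines (lines[-1] = lines[-1][:max_chars-1] + "…") — ported once.
def pvEllipsize (max_chars : Int) (lines : List (List Char)) : List (List Char) :=
  if lines ≠ [] ∧ PySem.Chars.len (PySem.List.pyGetD lines (-1) []) > max_chars then
    lines.dropLast ++ [PySem.Chars.slice (PySem.List.pyGetD lines (-1) []) none (some (max_chars - 1)) ++ ['…']]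
  else lines

-- ===== PORT A =====
-- A's word loop: accumulates `lines`/`cur`, flushes `cur` on overflow, and breaks (returns) as soon as
-- len(lines) >= max_lines right after a flush.
def pvALoop (max_chars max_lines : Int) : List (List Char) → List (List Char) → List Char → List (List Char) × List Char
  | [], lines, cur => (lines, cur)
  | w :: ws, lines, cur =>
    let nxt := PySem.Chars.strip (cur ++ [' '] ++ w)
    if PySem.Chars.len nxt ≤ max_chars then
      pvALoop max_chars max_lines ws lines nxt
    else
      let lines' := if cur ≠ [] then lines ++ [cur] else lines
      if PySem.List.len lines' ≥ max_lines then (lines', w)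
      else pvALoop max_chars max_lines ws lines' w

def wrap_lines (s : String) (max_chars : Int) (max_lines : Int) : List String :=
  let t := pvNorm s
  if t = [] then [""]
  else
    let words := PySem.Chars.splitOn t [' ']
    let r := pvALoop max_chars max_lines words [] []
    let lines1 := if PySem.List.len r.1 < max_lines ∧ r.2 ≠ [] then r.1 ++ [r.2] else r.1
    let lines2 := if PySem.List.len lines1 > max_lines then PySem.List.slice lines1 none (some max_lines) else lines1
    (pvEllipsize max_chars lines2).map (fun cs => String.ofList cs)

-- ===== PORT B =====
-- B's prefix-sum loop:  pref = [0]; for w in words: pref.append(pref[-1] + len(w))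
def pvPref : List (List Char) → List Int → List Int
  | [], pref => pref
  | w :: ws, pref => pvPref ws (pref ++ [PySem.List.pyGetD pref (-1) 0 + PySem.Chars.len w])

-- B's inner `while lo < hi` binary search over the prefix sums; the loop gap lo..hi shrinks
-- by at least one per iteration, so fuel = (hi - lo).toNat iterations are exactly enough.
def pvBSearch (pref : List Int) (max_chars i : Int) : Nat → Int → Int → Int
  | 0, lo, _ => lo
  | fuel + 1, lo, hi =>
    if lo < hi then
      -- mid = (lo + hi + 1) // 2, inlined
      if PySem.List.pyGetD pref (PySem.Int.floordiv (lo + hi + 1) 2) 0 - PySem.List.pyGetD pref i 0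
          + (PySem.Int.floordiv (lo + hi + 1) 2 - i - 1) ≤ max_chars then
        pvBSearch pref max_chars i fuel (PySem.Int.floordiv (lo + hi + 1) 2) hi
      else
        pvBSearch pref max_chars i fuel lo (PySem.Int.floordiv (lo + hi + 1) 2 - 1)
    else lo

-- B's outer `while i < n` loop: binary-search the break j, emit " ".join(words[i:j]), continue
-- at j; i advances by at least one word per line, so fuel = (n - i).toNat iterations suffice.
def pvBOuter (words : List (List Char)) (pref : List Int) (max_chars n : Int) :
    Nat → Int → List (List Char)
  | 0, _ => []
  | fuel + 1, i =>
    if i < n then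
      let j := pvBSearch pref max_chars i (n - (i + 1)).toNat (i + 1) n
      PySem.Chars.join [' '] (PySem.List.slice words (some i) (some j)) ::
        pvBOuter words pref max_chars n fuel j
    else []

def wrap_lines_alt (s : String) (max_chars : Int) (max_lines : Int) : List String :=
  let t := pvNorm s
  if t = [] then [""]
  else
    let words := PySem.Chars.splitOn t [' ']
    let pref := pvPref words [0]
    let full := pvBOuter words pref max_chars (PySem.List.len words) (PySem.List.len words).toNat 0
    let lines := if max_lines > 0 then PySem.List.slice full none (some max_lines) else []
    (pvEllipsize max_chars lines).map (fun cs => String.ofList cs)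

-- ===== PRECONDITION & SPEC =====
def Spec_wrap_lines (s : String) (max_chars : Int) (max_lines : Int) (out : List String) : Prop := out = wrap_lines_alt s max_chars max_lines
instance (s : String) (max_chars : Int) (max_lines : Int) (out : List String) : Decidable (Spec_wrap_lines s max_chars max_lines out) := by unfold Spec_wrap_lines; infer_instance

-- ===== CLAIM (what is proved, stated in full; the proofs are below) =====
def Claim_equal_wrap_lines : Prop := ∀ (s : String) (max_chars : Int) (max_lines : Int), Dom_wrap_lines s max_chars max_lines → Spec_wrap_lines s max_chars max_lines (wrap_lines s max_chars max_lines)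

-- ===== LEMMAS AND PROOFS =====

-- A's tail processing (final append + slice), as one function for the lemmas below.
def pvPostA (max_lines : Int) (p : List (List Char) × List Char) : List (List Char) :=
  let lines1 := if PySem.List.len p.1 < max_lines ∧ p.2 ≠ [] then p.1 ++ [p.2] else p.1
  if PySem.List.len lines1 > max_lines then PySem.List.slice lines1 none (some max_lines) else lines1

-- proof-only reference wrap: the plain full greedy accumulation both programs compute
def pvBLoop (max_chars : Int) : List (List Char) → List (List Char) → List Char → List (List Char)
  | [], lines, cur => lines ++ [cur]
  | w :: ws, lines, cur =>
    if PySem.Chars.len cur + 1 + PySem.Chars.len w ≤ max_chars then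
      pvBLoop max_chars ws lines (cur ++ [' '] ++ w)
    else
      pvBLoop max_chars ws (lines ++ [cur]) w

-- a word produced by Python's whitespace split: nonempty and whitespace-free
def pvWord (w : List Char) : Prop := w ≠ [] ∧ ∀ c ∈ w, PySem.Chars.isspace c = false

-- a reachable value of A's `cur`: nonempty, no whitespace at either end
def pvCur (cs : List Char) : Prop :=
  cs ≠ [] ∧ (∀ c, cs.head? = some c → PySem.Chars.isspace c = false)
    ∧ (∀ c, cs.getLast? = some c → PySem.Chars.isspace c = false)

lemma pvWord_pvCur {w : List Char} (h : pvWord w) : pvCur w := by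
  refine ⟨h.1, ?_, ?_⟩
  · intro c hc; exact h.2 c (List.mem_of_mem_head? hc)
  · intro c hc; exact h.2 c (List.mem_of_getLast? hc)

lemma pvCur_glue {a b : List Char} (ha : pvCur a) (hb : pvCur b) : pvCur (a ++ [' '] ++ b) := by
  refine ⟨by simp, ?_, ?_⟩
  · intro c hc
    rw [List.append_assoc, List.head?_append_of_ne_nil _ ha.1] at hc
    exact ha.2.1 c hc
  · intro c hc
    rw [List.getLast?_append_of_ne_nil _ hb.1] at hc
    exact hb.2.2 c hc

lemma pvLstrip_id {cs : List Char} (h : ∀ c, cs.head? = some c → PySem.Chars.isspace c = false) :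
    PySem.Chars.lstrip cs = cs := by
  cases cs with
  | nil => rfl
  | cons c t =>
    have hc : PySem.Chars.isspace c = false := h c rfl
    simp only [PySem.Chars.lstrip, List.dropWhile_cons, hc]
    simp

lemma pvRstrip_id {cs : List Char}
    (h : ∀ c, cs.getLast? = some c → PySem.Chars.isspace c = false) :
    PySem.Chars.rstrip cs = cs := by
  rcases hr : cs.reverse with _ | ⟨c, t⟩
  · simp only [List.reverse_eq_nil_iff] at hr; simp [hr, PySem.Chars.rstrip]
  · have hc : PySem.Chars.isspace c = false := by
      apply h; rw [← List.head?_reverse, hr]; rfl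
    unfold PySem.Chars.rstrip
    rw [hr]
    simp only [List.dropWhile_cons, hc]
    rw [← hr]
    simp

lemma pvStrip_id {cs : List Char} (h : pvCur cs) : PySem.Chars.strip cs = cs := by
  simp [PySem.Chars.strip, pvLstrip_id h.2.1, pvRstrip_id h.2.2]

lemma pvStrip_glue {a b : List Char} (ha : pvCur a) (hb : pvCur b) :
    PySem.Chars.strip (a ++ [' '] ++ b) = a ++ [' '] ++ b :=
  pvStrip_id (pvCur_glue ha hb)

lemma pvStrip_space_word {w : List Char} (h : pvWord w) :
    PySem.Chars.strip ([] ++ [' '] ++ w) = w := by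
  have hw := pvWord_pvCur h
  have h1 : PySem.Chars.lstrip (' ' :: w) = PySem.Chars.lstrip w := by
    simp only [PySem.Chars.lstrip, List.dropWhile_cons]
    simp [show PySem.Chars.isspace ' ' = true from by decide]
  simp [PySem.Chars.strip, h1, pvLstrip_id hw.2.1, pvRstrip_id hw.2.2]

-- length of a glued line
lemma pvLen_glue (a b : List Char) :
    PySem.Chars.len (a ++ [' '] ++ b) = PySem.Chars.len a + 1 + PySem.Chars.len b := by
  simp [PySem.Chars.len]; omega

-- splitOn of a ' '-free list is the singleton
lemma pvSplitOn_singleton {l : List Char} (h : ∀ c ∈ l, c ≠ ' ') : l.splitOn ' ' = [l] := by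
  induction l with
  | nil => simp
  | cons c rest ih =>
    have hc : (c == ' ') = false := by simpa using h c (by simp)
    simp only [List.splitOn, List.splitOnP_cons] at *
    rw [if_neg (by simp [hc]), ih (fun d hd => h d (by simp [hd]))]
    rfl

lemma pvSplitOn_append_sep {w rest : List Char} (h : ∀ c ∈ w, c ≠ ' ') :
    (w ++ ' ' :: rest).splitOn ' ' = w :: rest.splitOn ' ' := by
  induction w with
  | nil => simp [List.splitOn, List.splitOnP_cons]
  | cons c cs ih =>
    have hc : (c == ' ') = false := by simpa using h c (by simp)
    simp only [List.cons_append, List.splitOn, List.splitOnP_cons] at *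
    rw [if_neg (by simp [hc]), ih (fun d hd => h d (by simp [hd]))]
    rfl

-- PySem's splitOn agrees with Mathlib's List.splitOn for the single-char separator " "
lemma pvSplitOn_go_eq : ∀ (fuel : Nat) (l cur : List Char) (acc : List (List Char)),
    l.length < fuel → (∀ c ∈ cur, c ≠ ' ') →
    PySem.Chars.splitOn.go [' '] fuel l cur acc = acc.reverse ++ ((cur.reverse ++ l).splitOn ' ') := by
  intro fuel
  induction fuel with
  | zero => intro l cur acc h _; omega
  | succ n ih =>
    intro l cur acc hlt hcur
    cases l with
    | nil =>
      simp only [PySem.Chars.splitOn.go]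
      rw [List.append_nil, pvSplitOn_singleton (fun c hc => hcur c (List.mem_reverse.mp hc))]
      simp
    | cons c rest =>
      simp only [PySem.Chars.splitOn.go]
      by_cases hc : c = ' '
      · subst hc
        rw [if_pos (by simp [List.isPrefixOf])]
        rw [show List.drop [' '].length (' ' :: rest) = rest from rfl]
        rw [ih rest [] (cur.reverse :: acc) (by simpa using Nat.lt_of_succ_lt_succ hlt) (by simp)]
        rw [pvSplitOn_append_sep (fun d hd => hcur d (List.mem_reverse.mp hd))]
        simp
      · rw [if_neg (by simp [List.isPrefixOf]; exact fun h => hc h.symm)]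
        rw [ih rest (c :: cur) acc (by simpa using Nat.lt_of_succ_lt_succ hlt)
            (by intro d hd; rcases List.mem_cons.mp hd with hd | hd
                · exact hd ▸ hc
                · exact hcur d hd)]
        simp

lemma pvCharsSplitOn_eq (t : List Char) :
    PySem.Chars.splitOn t [' '] = t.splitOn ' ' := by
  simp only [PySem.Chars.splitOn]
  rw [pvSplitOn_go_eq (t.length + 1) t [] [] (by omega) (by simp)]
  simp

-- the tokens of split₀ are words (nonempty, whitespace-free)
lemma pvSplit₀_words : ∀ (s cur : List Char) (acc : List (List Char)),
    (∀ w ∈ acc, pvWord w) → (∀ c ∈ cur, PySem.Chars.isspace c = false) →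
    ∀ w ∈ PySem.Chars.split₀.go s cur acc, pvWord w := by
  intro s
  induction s with
  | nil =>
    intro cur acc hacc hcur w hw
    simp only [PySem.Chars.split₀.go] at hw
    by_cases hc : cur.isEmpty
    · rw [if_pos hc] at hw
      exact hacc w (List.mem_reverse.mp hw)
    · rw [if_neg hc] at hw
      rcases List.mem_cons.mp (List.mem_reverse.mp hw) with h | h
      · subst h
        exact ⟨by simpa [List.isEmpty_iff, List.reverse_eq_nil_iff] using hc,
          fun c hcm => hcur c (List.mem_reverse.mp hcm)⟩
      · exact hacc w h
  | cons c rest ih =>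
    intro cur acc hacc hcur w hw
    simp only [PySem.Chars.split₀.go] at hw
    by_cases hs : PySem.Chars.isspace c
    · by_cases hc : cur.isEmpty
      · rw [if_pos hs, if_pos hc] at hw
        exact ih [] acc hacc (by simp) w hw
      · rw [if_pos hs, if_neg hc] at hw
        refine ih [] (cur.reverse :: acc) ?_ (by simp) w hw
        intro v hv
        rcases List.mem_cons.mp hv with hv | hv
        · subst hv
          exact ⟨by simpa [List.isEmpty_iff, List.reverse_eq_nil_iff] using hc,
            fun d hd => hcur d (List.mem_reverse.mp hd)⟩
        · exact hacc v hv
    · rw [if_neg (by simp [hs])] at hw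
      refine ih (c :: cur) acc hacc ?_ w hw
      intro d hd
      rcases List.mem_cons.mp hd with hd | hd
      · subst hd; simpa using hs
      · exact hcur d hd

-- normalization round-trip: the words both programs split off are exactly split₀'s tokens
lemma pvWords_eq (s : String) :
    PySem.Chars.splitOn (pvNorm s) [' '] =
      PySem.Chars.split₀ ((if s = "" then "" else s).toList) ∨ pvNorm s = [] := by
  set parts := PySem.Chars.split₀ ((if s = "" then "" else s).toList) with hparts
  rcases hp : parts with _ | ⟨p, ps⟩
  · right
    simp [pvNorm, ← hparts, hp, PySem.Chars.join, List.intercalate]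
  · left
    have hwords : ∀ w ∈ parts, pvWord w := fun w hw =>
      pvSplit₀_words _ [] [] (by simp) (by simp) w hw
    rw [pvCharsSplitOn_eq]
    have hn : pvNorm s = [' '].intercalate parts := by
      simp [pvNorm, PySem.Chars.join, ← hparts]
    rw [hn, ← hp]
    exact List.splitOn_intercalate parts ' '
      (fun l hl hmem => by
        have := (hwords l hl).2 ' ' hmem
        simp [PySem.Chars.isspace] at this)
      (by rw [hp]; simp)

-- greedy reference wrap only ever appends to the accumulated lines
lemma pvBLoop_prefix (mc : Int) : ∀ (ws : List (List Char)) (a b : List (List Char)) (cur : List Char),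
    pvBLoop mc ws (a ++ b) cur = a ++ pvBLoop mc ws b cur := by
  intro ws
  induction ws with
  | nil => intro a b cur; simp [pvBLoop]
  | cons w ws ih =>
    intro a b cur
    simp only [pvBLoop]
    by_cases h : PySem.Chars.len cur + 1 + PySem.Chars.len w ≤ mc
    · rw [if_pos h, if_pos h, ih]
    · rw [if_neg h, if_neg h, List.append_assoc, ih]

-- a slice to a nonpositive stop of a short list is empty
lemma pvSlice_nonpos {α : Type} (xs : List α) (b : Int) (hb : b ≤ 0) (hlen : xs.length ≤ 1) :
    PySem.List.slice xs none (some b) = [] := by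
  rcases lt_or_eq_of_le hb with hb' | hb'
  · have hk : b = -(((-b).toNat : Nat) : Int) := by omega
    rw [hk, PySem.List.slice_to_neg_natCast _ _ (by omega)]
    have h0 : xs.length - (-b).toNat = 0 := by omega
    rw [h0, List.take_zero]
  · subst hb'
    rw [PySem.List.slice_to _ (le_refl 0)]
    rw [Int.toNat_zero, List.take_zero]

-- === A's early-break loop + tail processing ≡ full greedy wrap + truncation ===

-- the degenerate limit: with max_lines ≤ 0 A always ends with the empty list
lemma pvZero (mc ml : Int) (hml : ml ≤ 0) : ∀ (ws : List (List Char)) (cur : List Char),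
    pvPostA ml (pvALoop mc ml ws [] cur) = [] := by
  intro ws
  induction ws with
  | nil =>
    intro cur
    show pvPostA ml (([] : List (List Char)), cur) = []
    simp only [pvPostA]
    rw [if_neg (show ¬(PySem.List.len ([] : List (List Char)) < ml ∧ cur ≠ []) from by
      rintro ⟨h1, _⟩; simp [PySem.List.len_eq] at h1; omega)]
    by_cases h : PySem.List.len ([] : List (List Char)) > ml
    · rw [if_pos h]; exact pvSlice_nonpos _ ml hml (by simp)
    · rw [if_neg h]
  | cons w ws ih =>
    intro cur
    simp only [pvALoop]
    by_cases hfit : PySem.Chars.len (PySem.Chars.strip (cur ++ [' '] ++ w)) ≤ mc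
    · rw [if_pos hfit]; exact ih _
    · rw [if_neg hfit]
      by_cases hcur : cur ≠ []
      · rw [if_pos hcur]
        rw [if_pos (show PySem.List.len ([] ++ [cur]) ≥ ml from by
          simp only [PySem.List.len_eq, List.nil_append, List.length_cons, List.length_nil]; omega)]
        show pvPostA ml ([] ++ [cur], w) = []
        simp only [pvPostA]
        rw [if_neg (show ¬(PySem.List.len ([] ++ [cur]) < ml ∧ w ≠ []) from by
          rintro ⟨h1, _⟩
          simp only [PySem.List.len_eq, List.nil_append, List.length_cons, List.length_nil] at h1
          omega)]
        rw [if_pos (show PySem.List.len ([] ++ [cur]) > ml from by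
          simp only [PySem.List.len_eq, List.nil_append, List.length_cons, List.length_nil]; omega)]
        exact pvSlice_nonpos _ ml hml (by simp)
      · rw [if_neg hcur]
        rw [if_pos (show PySem.List.len ([] : List (List Char)) ≥ ml from by
          simp only [PySem.List.len_eq, List.length_nil]; omega)]
        show pvPostA ml (([] : List (List Char)), w) = []
        simp only [pvPostA]
        rw [if_neg (show ¬(PySem.List.len ([] : List (List Char)) < ml ∧ w ≠ []) from by
          rintro ⟨h1, _⟩; simp [PySem.List.len_eq] at h1; omega)]
        by_cases h : PySem.List.len ([] : List (List Char)) > ml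
        · rw [if_pos h]; exact pvSlice_nonpos _ ml hml (by simp)
        · rw [if_neg h]

-- the main invariant: while A has flushed fewer than max_lines lines, A's (loop + tail) equals
-- the max_lines-prefix of the full greedy wrap
lemma pvMain (mc ml : Int) : ∀ (ws : List (List Char)) (lines : List (List Char)) (cur : List Char),
    pvCur cur → (∀ w ∈ ws, pvWord w) → ((lines.length : Int) < ml) →
    pvPostA ml (pvALoop mc ml ws lines cur) = (pvBLoop mc ws lines cur).take ml.toNat := by
  intro ws
  induction ws with
  | nil =>
    intro lines cur hcur _ hlt
    show pvPostA ml (lines, cur) = (lines ++ [cur]).take ml.toNat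
    simp only [pvPostA]
    rw [if_pos (show PySem.List.len lines < ml ∧ cur ≠ [] from
      ⟨by simp only [PySem.List.len_eq]; exact hlt, hcur.1⟩)]
    rw [if_neg (show ¬ PySem.List.len (lines ++ [cur]) > ml from by
      simp only [PySem.List.len_eq, List.length_append, List.length_cons, List.length_nil]; omega)]
    rw [List.take_of_length_le (by
      simp only [List.length_append, List.length_cons, List.length_nil]; omega)]
  | cons w ws ih =>
    intro lines cur hcur hws hlt
    have hw : pvWord w := hws w (by simp)
    simp only [pvALoop, pvBLoop]
    rw [pvStrip_glue hcur (pvWord_pvCur hw), pvLen_glue]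
    by_cases hfit : PySem.Chars.len cur + 1 + PySem.Chars.len w ≤ mc
    · rw [if_pos hfit, if_pos hfit]
      exact ih lines _ (pvCur_glue hcur (pvWord_pvCur hw)) (fun v hv => hws v (by simp [hv])) hlt
    · rw [if_neg hfit, if_neg hfit, if_pos hcur.1]
      by_cases hbrk : PySem.List.len (lines ++ [cur]) ≥ ml
      · rw [if_pos hbrk]
        simp only [PySem.List.len_eq, List.length_append, List.length_cons, List.length_nil] at hbrk
        show pvPostA ml (lines ++ [cur], w) = _
        simp only [pvPostA]
        rw [if_neg (show ¬(PySem.List.len (lines ++ [cur]) < ml ∧ w ≠ []) from by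
          rintro ⟨h1, _⟩; simp only [PySem.List.len_eq] at h1
          simp only [List.length_append, List.length_cons, List.length_nil] at h1
          push_cast at h1; omega)]
        rw [if_neg (show ¬ PySem.List.len (lines ++ [cur]) > ml from by
          simp only [PySem.List.len_eq, List.length_append, List.length_cons, List.length_nil]
          push_cast; omega)]
        rw [show pvBLoop mc ws (lines ++ [cur]) w
              = pvBLoop mc ws ((lines ++ [cur]) ++ []) w from by rw [List.append_nil]]
        rw [pvBLoop_prefix, List.take_append]
        rw [List.take_of_length_le (by
          simp only [List.length_append, List.length_cons, List.length_nil]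
          push_cast at hbrk ⊢; omega)]
        rw [show ml.toNat - (lines ++ [cur]).length = 0 from by
          simp only [List.length_append, List.length_cons, List.length_nil]
          push_cast at hbrk ⊢; omega]
        rw [List.take_zero, List.append_nil]
      · rw [if_neg hbrk]
        simp only [PySem.List.len_eq, List.length_append, List.length_cons, List.length_nil] at hbrk
        exact ih (lines ++ [cur]) w (pvWord_pvCur hw) (fun v hv => hws v (by simp [hv]))
          (by simp only [List.length_append, List.length_cons, List.length_nil]; push_cast; omega)

-- === B's prefix-sum / binary-search wrap ≡ full greedy wrap ===

-- running sums, as built by B's pref loop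
def pvSums (t : Int) : List (List Char) → List Int
  | [] => []
  | w :: ws => (t + PySem.Chars.len w) :: pvSums (t + PySem.Chars.len w) ws

-- total width of the first m words
def pvS (words : List (List Char)) (m : Nat) : Int := ((words.take m).map PySem.Chars.len).sum

-- "words[i:j] joined with single spaces fits in max_chars"
def pvF (words : List (List Char)) (mc : Int) (i j : Nat) : Prop :=
  pvS words j - pvS words i + ((j : Int) - (i : Int) - 1) ≤ mc

-- the joined slice words[i:k]
def pvJ (words : List (List Char)) (i k : Nat) : List Char :=
  PySem.Chars.join [' '] ((words.drop i).take (k - i))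

lemma pvGetD_last_append (xs : List Int) (x : Int) :
    PySem.List.pyGetD (xs ++ [x]) (-1) 0 = x := by
  simp [PySem.List.pyGetD, PySem.List.pyGet?, PySem.List.pyIdx?]

lemma pvPref_eq : ∀ (ws : List (List Char)) (acc : List Int) (t : Int),
    PySem.List.pyGetD acc (-1) 0 = t → acc ≠ [] → pvPref ws acc = acc ++ pvSums t ws := by
  intro ws
  induction ws with
  | nil => intro acc t _ _; simp [pvPref, pvSums]
  | cons w ws ih =>
    intro acc t ht hne
    simp only [pvPref, pvSums, ht]
    rw [ih (acc ++ [t + PySem.Chars.len w]) (t + PySem.Chars.len w) (pvGetD_last_append _ _) (by simp)]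
    simp

lemma pvSums_getD : ∀ (ws : List (List Char)) (t : Int) (m : Nat), m ≤ ws.length →
    (t :: pvSums t ws).getD m 0 = t + pvS ws m := by
  intro ws
  induction ws with
  | nil =>
    intro t m hm
    have hm0 : m = 0 := by simpa using hm
    subst hm0
    simp [pvS]
  | cons w ws ih =>
    intro t m hm
    cases m with
    | zero => simp [pvS]
    | succ m =>
      have h := ih (t + PySem.Chars.len w) m (by simpa using hm)
      rw [List.getD_cons_succ]
      show ((t + PySem.Chars.len w) :: pvSums (t + PySem.Chars.len w) ws).getD m 0 = _
      rw [h]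
      simp only [pvS, List.take_succ_cons, List.map_cons, List.sum_cons]
      ring

-- pref[m] = pvS words m, for m ≤ len(words)
lemma pvPref_getD (words : List (List Char)) (m : Nat) (hm : m ≤ words.length) :
    PySem.List.pyGetD (pvPref words [0]) ((m : Nat) : Int) 0 = pvS words m := by
  rw [pvPref_eq words [0] 0 (by decide) (by simp)]
  rw [show ([(0:Int)] ++ pvSums 0 words) = (0 : Int) :: pvSums 0 words from rfl]
  rw [PySem.List.pyGetD_natCast]
  rw [pvSums_getD words 0 m hm]
  ring

-- pvS is monotone (word lengths are nonnegative)
lemma pvS_mono (words : List (List Char)) {a b : Nat} (hab : a ≤ b) :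
    pvS words a ≤ pvS words b := by
  unfold pvS
  rw [show b = a + (b - a) from by omega, List.take_add, List.map_append, List.sum_append]
  have hx : ∀ x ∈ ((words.drop a).take (b - a)).map PySem.Chars.len, 0 ≤ x := by
    intro x hx
    obtain ⟨w, _, rfl⟩ := List.mem_map.mp hx
    simp [PySem.Chars.len_eq]
  have := List.sum_nonneg hx
  omega

lemma pvS_succ (words : List (List Char)) (m : Nat) (hm : m < words.length) :
    pvS words (m + 1) = pvS words m + PySem.Chars.len words[m] := by
  unfold pvS
  rw [List.map_take, List.map_take,
    List.sum_take_succ (List.map PySem.Chars.len words) m (by simpa using hm), List.getElem_map]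

-- fitting is downward closed
lemma pvF_mono (words : List (List Char)) (mc : Int) (i : Nat) {a b : Nat}
    (hab : a ≤ b) (h : pvF words mc i b) : pvF words mc i a := by
  have := pvS_mono words hab
  unfold pvF at *
  omega

-- the binary search finds the unique greedy break point
lemma pvBSearch_spec (words : List (List Char)) (mc : Int) (i : Nat) (hi' : i < words.length) :
    ∀ (fuel : Nat) (lo hi : Nat), hi - lo ≤ fuel →
      i + 1 ≤ lo → lo ≤ hi → hi ≤ words.length →
      (lo = i + 1 ∨ pvF words mc i lo) → (hi = words.length ∨ ¬ pvF words mc i (hi + 1)) →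
      ∃ j : Nat, pvBSearch (pvPref words [0]) mc (i : Int) fuel (lo : Int) (hi : Int) = (j : Int) ∧
        i + 1 ≤ j ∧ j ≤ words.length ∧ (j = i + 1 ∨ pvF words mc i j) ∧
        (j = words.length ∨ ¬ pvF words mc i (j + 1)) := by
  intro fuel
  induction fuel with
  | zero =>
    intro lo hi hfuel hlo hlohi hhiL h1 h2
    exact ⟨lo, rfl, hlo, by omega, h1, (show lo = hi from by omega) ▸ h2⟩
  | succ n ih =>
    intro lo hi hfuel hlo hlohi hhiL h1 h2
    by_cases hlt : lo < hi
    · rw [pvBSearch, if_pos (show ((lo:Int) < (hi:Int)) from by exact_mod_cast hlt)]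
      have hmid : PySem.Int.floordiv ((lo:Int) + (hi:Int) + 1) 2
          = (((lo + hi + 1) / 2 : Nat) : Int) := by
        rw [PySem.Int.floordiv_eq_ediv_of_pos (by omega)]
        omega
      set m := (lo + hi + 1) / 2 with hm
      have hm1 : lo < m := by omega
      have hm2 : m ≤ hi := by omega
      rw [hmid, pvPref_getD words m (by omega), pvPref_getD words i (by omega)]
      by_cases hF : pvF words mc i m
      · rw [if_pos (by unfold pvF at hF; exact hF)]
        exact ih m hi (by omega) (by omega) hm2 hhiL (Or.inr hF) h2
      · rw [if_neg (by unfold pvF at hF; exact hF)]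
        rw [show ((m:Nat):Int) - 1 = (((m - 1 : Nat)):Int) from by omega]
        exact ih lo (m - 1) (by omega) hlo (by omega) (by omega) h1
          (Or.inr (by rwa [show m - 1 + 1 = m from by omega]))
    · rw [pvBSearch, if_neg (show ¬((lo:Int) < (hi:Int)) from by exact_mod_cast hlt)]
      exact ⟨lo, rfl, hlo, by omega, h1, (show lo = hi from by omega) ▸ h2⟩

-- the joined slice: one word, and growing by one word
lemma pvJ_single (words : List (List Char)) (i : Nat) (hi : i < words.length) :
    pvJ words i (i + 1) = words[i] := by
  unfold pvJ
  rw [show i + 1 - i = 1 from by omega, List.drop_eq_getElem_cons hi]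
  rw [List.take_succ_cons, List.take_zero, PySem.Chars.join_singleton]

lemma pvJoin_append (x : List Char) : ∀ (xs : List (List Char)), xs ≠ [] →
    PySem.Chars.join [' '] (xs ++ [x]) = PySem.Chars.join [' '] xs ++ [' '] ++ x := by
  intro xs
  induction xs with
  | nil => intro h; exact absurd rfl h
  | cons y ys ih =>
    intro _
    cases ys with
    | nil => rw [List.cons_append, List.nil_append, PySem.Chars.join_cons_cons,
        PySem.Chars.join_singleton, PySem.Chars.join_singleton]
    | cons z zs =>
      simp only [List.cons_append] at ih ⊢
      rw [PySem.Chars.join_cons_cons, ih (by simp), PySem.Chars.join_cons_cons]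
      simp

lemma pvJ_succ (words : List (List Char)) (i k : Nat) (hik : i + 1 ≤ k) (hk : k < words.length) :
    pvJ words i (k + 1) = pvJ words i k ++ [' '] ++ words[k] := by
  unfold pvJ
  rw [show k + 1 - i = (k - i) + 1 from by omega, List.take_add_one]
  rw [List.getElem?_drop, show i + (k - i) = k from by omega, List.getElem?_eq_getElem hk]
  rw [Option.toList_some]
  rw [pvJoin_append]
  intro hemp
  have := congrArg List.length hemp
  simp at this
  omega

lemma pvJ_len (words : List (List Char)) (i : Nat) : ∀ (k : Nat), i < k → k ≤ words.length →
    PySem.Chars.len (pvJ words i k) = pvS words k - pvS words i + ((k : Int) - (i : Int) - 1) := by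
  intro k hik
  induction k, hik using Nat.le_induction with
  | base =>
    intro hk
    have hi : i < words.length := by omega
    rw [pvJ_single words i hi, pvS_succ words i hi]
    push_cast
    ring
  | succ k hik ihk =>
    intro hk
    have hkL : k < words.length := by omega
    rw [pvJ_succ words i k hik hkL, pvLen_glue, ihk (by omega), pvS_succ words k hkL]
    push_cast
    ring

-- the greedy loop consumes exactly up to the break point j
lemma pvConsume (words : List (List Char)) (mc : Int) (i j : Nat)
    (hij : i + 1 ≤ j) (hj : j ≤ words.length)
    (hfit : j = i + 1 ∨ pvF words mc i j) (hstop : j = words.length ∨ ¬ pvF words mc i (j + 1)) :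
    ∀ (k : Nat), i + 1 ≤ k → k ≤ j → (k = i + 1 ∨ pvF words mc i k) →
      pvBLoop mc (words.drop k) [] (pvJ words i k) =
        pvJ words i j :: (if h : j = words.length then []
          else pvBLoop mc (words.drop (j + 1)) [] (words[j]'(by omega))) := by
  have hterm : pvBLoop mc (words.drop j) [] (pvJ words i j) =
      pvJ words i j :: (if h : j = words.length then []
        else pvBLoop mc (words.drop (j + 1)) [] (words[j]'(by omega))) := by
    by_cases hjL : j = words.length
    · rw [dif_pos hjL, hjL, List.drop_length]
      rfl
    · have hjL' : j < words.length := by omega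
      have hnF : ¬ pvF words mc i (j + 1) := by
        rcases hstop with h | h
        · exact absurd h hjL
        · exact h
      rw [dif_neg hjL, List.drop_eq_getElem_cons hjL']
      simp only [pvBLoop]
      rw [if_neg (show ¬(PySem.Chars.len (pvJ words i j) + 1
            + PySem.Chars.len (words[j]'hjL') ≤ mc) from by
        rw [pvJ_len words i j (by omega) hj]
        have hs := pvS_succ words j hjL'
        unfold pvF at hnF
        push_cast at hnF ⊢
        omega)]
      rw [show ([] ++ [pvJ words i j] : List (List Char)) = [pvJ words i j] ++ [] from by simp,
        pvBLoop_prefix, List.singleton_append]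
  have main : ∀ (fuel k : Nat), j - k ≤ fuel → i + 1 ≤ k → k ≤ j → (k = i + 1 ∨ pvF words mc i k) →
      pvBLoop mc (words.drop k) [] (pvJ words i k) =
        pvJ words i j :: (if h : j = words.length then []
          else pvBLoop mc (words.drop (j + 1)) [] (words[j]'(by omega))) := by
    intro fuel
    induction fuel with
    | zero =>
      intro k hf hk1 hk2 _
      exact (show k = j from by omega) ▸ hterm
    | succ n ihf =>
      intro k hf hk1 hk2 hk3
      by_cases hkj : k = j
      · exact hkj ▸ hterm
      · have hkj' : k < j := by omega
        have hkL : k < words.length := by omega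
        have hFk1 : pvF words mc i (k + 1) := by
          rcases hfit with h | h
          · exact absurd h (by omega)
          · exact pvF_mono words mc i (by omega) h
        rw [List.drop_eq_getElem_cons hkL]
        simp only [pvBLoop]
        rw [if_pos (show PySem.Chars.len (pvJ words i k) + 1
              + PySem.Chars.len (words[k]'hkL) ≤ mc from by
          rw [pvJ_len words i k (by omega) (by omega)]
          have hs := pvS_succ words k hkL
          unfold pvF at hFk1
          push_cast at hFk1 ⊢
          omega)]
        rw [← pvJ_succ words i k hk1 hkL]
        exact ihf (k + 1) (by omega) (by omega) (by omega) (Or.inr hFk1)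
  intro k hk1 hk2 hk3
  exact main (j - k) k le_rfl hk1 hk2 hk3

-- B's outer loop equals the full greedy wrap
lemma pvBOuter_eq (words : List (List Char)) (mc : Int) :
    ∀ (fuel : Nat) (i : Nat), words.length - i ≤ fuel → ∀ (hlt : i < words.length),
      pvBOuter words (pvPref words [0]) mc ((words.length : Nat) : Int) fuel (i : Int) =
        pvBLoop mc (words.drop (i + 1)) [] (words[i]'hlt) := by
  intro fuel
  induction fuel with
  | zero => intro i h hlt; omega
  | succ n ihf =>
    intro i h hlt
    obtain ⟨j, hjeq, hj1, hj2, hj3, hj4⟩ :=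
      pvBSearch_spec words mc i hlt (words.length - (i + 1)) (i + 1) words.length
        (by omega) le_rfl (by omega) le_rfl (Or.inl rfl) (Or.inl rfl)
    rw [pvBOuter, if_pos (show ((i:Int)) < ((words.length : Nat) : Int) from by exact_mod_cast hlt)]
    have hcast : ((i:Int) + 1) = (((i + 1 : Nat)) : Int) := by push_cast; ring
    have hfz : (((words.length : Nat) : Int) - (((i + 1 : Nat)) : Int)).toNat
        = words.length - (i + 1) := by omega
    simp only [hcast, hfz, hjeq]
    rw [PySem.List.slice_natCast]
    rw [show PySem.Chars.join [' '] ((words.drop i).take (j - i)) = pvJ words i j from rfl]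
    rw [← pvJ_single words i hlt]
    rw [pvConsume words mc i j hj1 hj2 hj3 hj4 (i + 1) le_rfl hj1 (Or.inl rfl)]
    congr 1
    by_cases hjL : j = words.length
    · rw [dif_pos hjL, hjL]
      cases n with
      | zero => rfl
      | succ m =>
        rw [pvBOuter,
          if_neg (show ¬(((words.length : Nat) : Int) < ((words.length : Nat) : Int)) from by omega)]
    · rw [dif_neg hjL]
      exact ihf j (by omega) (by omega)

-- both ports with their let-chains written out (definitional)
lemma pvWrapA_eq (s : String) (mc ml : Int) :
    wrap_lines s mc ml = if pvNorm s = [] then [""] else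
      (pvEllipsize mc (pvPostA ml (pvALoop mc ml (PySem.Chars.splitOn (pvNorm s) [' ']) [] []))).map
        (fun cs => String.ofList cs) := rfl

lemma pvWrapB_eq (s : String) (mc ml : Int) :
    wrap_lines_alt s mc ml = if pvNorm s = [] then [""] else
      (pvEllipsize mc (if ml > 0 then
          PySem.List.slice (pvBOuter (PySem.Chars.splitOn (pvNorm s) [' '])
              (pvPref (PySem.Chars.splitOn (pvNorm s) [' ']) [0]) mc
              (PySem.List.len (PySem.Chars.splitOn (pvNorm s) [' ']))
              (PySem.List.len (PySem.Chars.splitOn (pvNorm s) [' '])).toNat 0) none (some ml)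
        else [])).map (fun cs => String.ofList cs) := rfl

-- both sides, assembled for a nonempty normalized string
lemma pvAssemble (s : String) (mc ml : Int) (hne : pvNorm s ≠ []) :
    wrap_lines s mc ml = wrap_lines_alt s mc ml := by
  rcases pvWords_eq s with hwords | hnil
  swap
  · exact absurd hnil hne
  have hwordsP : ∀ w ∈ PySem.Chars.splitOn (pvNorm s) [' '], pvWord w := by
    rw [hwords]; intro w hw
    exact pvSplit₀_words _ [] [] (by simp) (by simp) w hw
  rcases hsplit : PySem.Chars.splitOn (pvNorm s) [' '] with _ | ⟨w0, ws⟩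
  · exfalso
    apply hne
    rw [hwords] at hsplit
    simp [pvNorm, hsplit, PySem.Chars.join, List.intercalate]
  have hw0 : pvWord w0 := hwordsP w0 (by rw [hsplit]; simp)
  have hws : ∀ w ∈ ws, pvWord w := fun w hw => hwordsP w (by rw [hsplit]; simp [hw])
  rw [pvWrapA_eq, pvWrapB_eq, if_neg hne, if_neg hne, hsplit]
  have hBfull : pvBOuter (w0 :: ws) (pvPref (w0 :: ws) [0]) mc (PySem.List.len (w0 :: ws))
      (PySem.List.len (w0 :: ws)).toNat 0 = pvBLoop mc ws [] w0 := by
    have h := pvBOuter_eq (w0 :: ws) mc (w0 :: ws).length 0 (by omega) (by simp)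
    rw [PySem.List.len_eq]
    simpa using h
  by_cases hml : 0 < ml
  · have hfirst : pvALoop mc ml (w0 :: ws) [] [] = pvALoop mc ml ws [] w0 := by
      simp only [pvALoop]
      rw [pvStrip_space_word hw0]
      by_cases hfit : PySem.Chars.len w0 ≤ mc
      · rw [if_pos hfit]
      · rw [if_neg hfit]
        rw [if_neg (show ¬(([] : List Char) ≠ []) from by simp)]
        rw [if_neg (show ¬ PySem.List.len ([] : List (List Char)) ≥ ml from by
          simp only [PySem.List.len_eq, List.length_nil]; omega)]
    rw [hfirst, pvMain mc ml ws [] w0 (pvWord_pvCur hw0) hws (by simpa using hml)]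
    rw [if_pos hml, hBfull, PySem.List.slice_to _ (show (0:Int) ≤ ml from by omega)]
  · rw [pvZero mc ml (by omega) (w0 :: ws) [], if_neg hml]

-- ===== VERDICT (by name: the statement is the Claim_ definition above) =====
theorem wrap_lines_spec : Claim_equal_wrap_lines := by
  intro s mc ml _
  unfold Spec_wrap_lines
  by_cases hne : pvNorm s = []
  · rw [pvWrapA_eq, pvWrapB_eq, if_pos hne, if_pos hne]
  · exact pvAssemble s mc ml hne
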